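-- pv_equiv track=rewrite | github.com/Flychuban/9grade_Python | kontrolno.py | is_permutation
-- ===== SOURCE A (Python) =====
-- def is_permutation(my_arr):
--     for i in range(len(my_arr)):
--         my_arr[i].sort()
--
--     permutation_indexes = []
--     for i in range(len(my_arr) - 1):
--         for j in range(i + 1, len(my_arr)):
--             if my_arr[i] == my_arr[j]:
--                 if i in permutation_indexes:
--                     permutation_indexes.append(j)
--                 else:
--                     permutation_indexes.extend((i, j))
--                 break
--
--     return permutation_indexes
-- ===== SOURCE B (Python) =====
-- def is_permutation(my_arr):
--     n = len(my_arr)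
--     # last[key] = (most recent index with this sorted key, whether that index is the group's first occurrence)
--     last = {}
--     slots = [None] * n
--     for j in range(n):
--         key = tuple(sorted(my_arr[j]))
--         if key in last:
--             p, p_first = last[key]
--             slots[p] = [p, j] if p_first else [j]
--             last[key] = (j, False)
--         else:
--             last[key] = (j, True)
--     out = []
--     for slot in slots:
--         if slot is not None:
--             out.extend(slot)
--     return out
-- ===== Notes on version B (the rewrite author's own statement) =====
-- stated objective: alternative
-- what changed: Replaces A's quadratic scan (for each i, rescan the suffix for the first equal sorted sublist, plus a linear membership test on the output list) by one pass that keys each sublist by its sorted form in a dict of (last occurrence, is-first-occurrence) pointers, writing each emitted chunk into a slot at its predecessor's position so the output order is identical.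
import Mathlib
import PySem

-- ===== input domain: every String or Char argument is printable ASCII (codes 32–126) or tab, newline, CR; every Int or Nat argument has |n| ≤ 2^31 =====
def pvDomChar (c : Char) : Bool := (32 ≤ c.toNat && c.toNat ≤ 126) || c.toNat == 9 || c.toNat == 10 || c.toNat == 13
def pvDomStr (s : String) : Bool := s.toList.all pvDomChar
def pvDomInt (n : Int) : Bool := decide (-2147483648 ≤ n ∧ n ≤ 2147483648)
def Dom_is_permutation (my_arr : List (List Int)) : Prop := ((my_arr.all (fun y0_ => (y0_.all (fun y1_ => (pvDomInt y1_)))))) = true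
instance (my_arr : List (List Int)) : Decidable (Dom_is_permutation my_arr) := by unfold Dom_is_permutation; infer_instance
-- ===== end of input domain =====

-- B replaces A's quadratic suffix rescans by one hashed pass (sorted key -> last occurrence
-- pointer, chunks written into per-index slots); equivalence is about the RETURN value only
-- (Python A sorts each sublist of my_arr in place, B does not mutate its argument).


-- ===== PORT A =====
-- sort each my_arr[i]; then for each i in range(n-1) scan j in range(i+1,n) for the first equal
-- sorted sublist (the `break`), appending (i,j) or just j depending on `i in permutation_indexes`.
def is_permutation (my_arr : List (List Int)) : List Int :=
  let s := my_arr.map (fun x => PySem.List.sorted x (fun v => v) false)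
  (List.range (s.length - 1)).foldl (fun acc i =>
    match (List.range' (i+1) (s.length - (i+1))).find?
            (fun j => s.getD j [] == s.getD i []) with
    | some j => if acc.contains ((i : Int)) then acc ++ [(j : Int)]
                else acc ++ [(i : Int), (j : Int)]
    | none => acc) []

-- ===== PORT B =====
-- one pass: dict `last` maps sorted key ↦ (most recent index, that index is the group's first
-- occurrence); each emitted chunk is written into `slots` at its predecessor's position; then concat.
def is_permutation_alt (my_arr : List (List Int)) : List Int :=
  let n := my_arr.length
  let st := (List.range n).foldl
    (fun (st : PySem.Dict (List Int) (Nat × Bool) × List (Option (List Int))) j =>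
      let key := PySem.List.sorted (my_arr.getD j []) (fun v => v) false
      match st.1.get? key with
      | some pf =>
          (st.1.insert key (j, false),
           st.2.set pf.1 (some (if pf.2 then [(pf.1 : Int), (j : Int)] else [(j : Int)])))
      | none => (st.1.insert key (j, true), st.2))
    (PySem.Dict.empty, List.replicate n none)
  st.2.foldl (fun out slot => match slot with | some l => out ++ l | none => out) []

-- ===== PRECONDITION & SPEC =====
def Spec_is_permutation (my_arr : List (List Int)) (out : List Int) : Prop := out = is_permutation_alt my_arr
instance (my_arr : List (List Int)) (out : List Int) : Decidable (Spec_is_permutation my_arr out) := by unfold Spec_is_permutation; infer_instance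

-- ===== CLAIM (what is proved, stated in full; the proofs are below) =====
def Claim_equal_is_permutation : Prop := ∀ (my_arr : List (List Int)), Dom_is_permutation my_arr → Spec_is_permutation my_arr (is_permutation my_arr)

-- ===== LEMMAS AND PROOFS =====
-- Both ports are shown equal to (List.range n).flatMap (pvC A): index i contributes [i, j]
-- (if i is the first occurrence of its sorted key) or [j] (otherwise), j the next equal index.

def pvKey (A : List (List Int)) (i : Nat) : List Int :=
  PySem.List.sorted (A.getD i []) (fun v => v) false
def pvSucc (A : List (List Int)) (m i : Nat) : Option Nat :=
  (List.range' (i+1) (m - (i+1))).find? (fun j => pvKey A j == pvKey A i)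
def pvFirst (A : List (List Int)) (i : Nat) : Bool :=
  (List.range i).all (fun t => !(pvKey A t == pvKey A i))
def pvSlot (A : List (List Int)) (m t : Nat) : Option (List Int) :=
  (pvSucc A m t).map (fun j => if pvFirst A t then [(t : Int), (j : Int)] else [(j : Int)])
def pvC (A : List (List Int)) (t : Nat) : List Int := (pvSlot A A.length t).getD []
def pvLo (A : List (List Int)) (m : Nat) (key : List Int) : Option Nat :=
  ((List.range m).reverse).find? (fun u => pvKey A u == key)

theorem pv_exists_greatest {P : Nat → Prop} [DecidablePred P] :
    ∀ i, (∃ t, t < i ∧ P t) → ∃ t, t < i ∧ P t ∧ ∀ u, t < u → u < i → ¬ P u := by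
  intro i
  induction i with
  | zero => rintro ⟨t, ht, _⟩; omega
  | succ m ih =>
    rintro ⟨t, ht, hp⟩
    by_cases hm : P m
    · exact ⟨m, Nat.lt_succ_self m, hm, fun u hu1 hu2 _ => by omega⟩
    · have : t < m := by rcases Nat.lt_succ_iff_lt_or_eq.mp ht with h | h; exact h; subst h; exact absurd hp hm
      obtain ⟨s, hs1, hs2, hs3⟩ := ih ⟨t, this, hp⟩
      exact ⟨s, by omega, hs2, fun u hu1 hu2 => by
        rcases Nat.lt_succ_iff_lt_or_eq.mp hu2 with h | h
        · exact hs3 u hu1 h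
        · subst h; exact hm⟩

-- the successor of the greatest earlier occurrence of key(i) below i is i itself
theorem pv_succ_of_greatest (A : List (List Int)) {t i : Nat} (hin : i < A.length)
    (hti : t < i) (hk : pvKey A t = pvKey A i)
    (hmax : ∀ u, t < u → u < i → pvKey A u ≠ pvKey A i) :
    pvSucc A A.length t = some i := by
  unfold pvSucc
  have hsplit : List.range' (t+1) (A.length - (t+1)) =
      List.range' (t+1) (i - (t+1)) ++ List.range' i (A.length - i) := by
    have h := List.range'_append (s := t+1) (m := i - (t+1)) (n := A.length - i) (step := 1)
    have e1 : t + 1 + 1 * (i - (t+1)) = i := by omega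
    have e2 : i - (t+1) + (A.length - i) = A.length - (t+1) := by omega
    rw [e1, e2] at h
    exact h.symm
  rw [hsplit, List.find?_append]
  have h1 : (List.range' (t+1) (i - (t+1))).find? (fun j => pvKey A j == pvKey A t) = none := by
    rw [List.find?_eq_none]
    intro u hu
    rw [List.mem_range'_1] at hu
    simp only [beq_iff_eq]
    intro hc
    exact hmax u (by omega) (by omega) (hk ▸ hc)
  rw [h1]
  simp only [Option.none_or]
  have h2 : List.range' i (A.length - i) = i :: List.range' (i+1) (A.length - i - 1) := by
    have : A.length - i = (A.length - i - 1) + 1 := by omega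
    rw [this, List.range'_succ]
    simp
  rw [h2, List.find?_cons_of_pos]
  simp [hk]

theorem pv_mem_prefix (A : List (List Int)) (i : Nat) (hi : i < A.length) :
    ((i : Int) ∈ (List.range i).flatMap (pvC A)) ↔ pvFirst A i = false := by
  constructor
  · intro h
    rw [List.mem_flatMap] at h
    obtain ⟨t, ht, hmem⟩ := h
    rw [List.mem_range] at ht
    unfold pvC pvSlot at hmem
    rcases hsucc : pvSucc A A.length t with _ | j
    · simp [hsucc] at hmem
    · simp only [hsucc] at hmem
      have hji : j = i := by
        split at hmem <;> simp at hmem <;> omega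
      subst hji
      have hjk : pvKey A j = pvKey A t := by
        have := List.find?_some hsucc
        simpa using this
      unfold pvFirst
      rw [List.all_eq_false]
      exact ⟨t, List.mem_range.mpr ht, by simp [hjk]⟩
  · intro h
    unfold pvFirst at h
    rw [List.all_eq_false] at h
    obtain ⟨t, ht, hp⟩ := h
    rw [List.mem_range] at ht
    simp only [Bool.not_eq_true', Bool.not_eq_false, beq_iff_eq] at hp
    obtain ⟨s, hs1, hs2, hs3⟩ := pv_exists_greatest (P := fun u => pvKey A u = pvKey A i) i ⟨t, ht, hp⟩
    have hsucc := pv_succ_of_greatest A hi hs1 hs2 hs3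
    rw [List.mem_flatMap]
    refine ⟨s, List.mem_range.mpr hs1, ?_⟩
    unfold pvC pvSlot
    rw [hsucc]
    split <;> simp

theorem pv_getD_map_sorted (A : List (List Int)) (i : Nat) :
    (A.map (fun x => PySem.List.sorted x (fun v => v) false)).getD i [] = pvKey A i := by
  unfold pvKey
  rcases lt_or_ge i A.length with h | h
  · simp [List.getD_eq_getElem?_getD, List.getElem?_map, List.getElem?_eq_getElem h]
  · rw [List.getD_eq_default _ _ (by simpa using h), List.getD_eq_default _ _ h]
    rfl

theorem pv_C_of_succ_none (A : List (List Int)) (t : Nat)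
    (h : pvSucc A A.length t = none) : pvC A t = [] := by
  unfold pvC pvSlot; rw [h]; rfl

theorem pv_foldA (A : List (List Int)) :
    ∀ m, m ≤ A.length - 1 →
    (List.range m).foldl (fun acc i =>
      match pvSucc A A.length i with
      | some j => if acc.contains ((i : Int)) then acc ++ [(j : Int)]
                  else acc ++ [(i : Int), (j : Int)]
      | none => acc) []
    = (List.range m).flatMap (pvC A) := by
  intro m
  induction m with
  | zero => intro _; rfl
  | succ k ih =>
    intro hk
    have hkn : k < A.length := by omega
    rw [List.range_succ, List.foldl_append, List.flatMap_append, ih (by omega)]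
    simp only [List.foldl_cons, List.foldl_nil, List.flatMap_cons, List.flatMap_nil,
      List.append_nil]
    rcases hsucc : pvSucc A A.length k with _ | j
    · rw [pv_C_of_succ_none A k hsucc, List.append_nil]
    · have hC : pvC A k = if pvFirst A k then [(k : Int), (j : Int)] else [(j : Int)] := by
        unfold pvC pvSlot; rw [hsucc]; rfl
      have hmem := pv_mem_prefix A k hkn
      rcases hf : pvFirst A k with _ | _
      · have : ((k : Int) ∈ (List.range k).flatMap (pvC A)) := hmem.mpr hf
        rw [hC]; simp [this, hf]
      · have : ¬ ((k : Int) ∈ (List.range k).flatMap (pvC A)) := by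
          intro hmm; exact absurd (hmem.mp hmm) (by simp [hf])
        rw [hC]; simp [this, hf]

theorem pv_A_eq_flatMap (A : List (List Int)) :
    is_permutation A = (List.range A.length).flatMap (pvC A) := by
  unfold is_permutation
  simp only [List.length_map]
  have hfun : (fun (acc : List Int) (i : Nat) =>
      match (List.range' (i+1) (A.length - (i+1))).find?
              (fun j => (A.map (fun x => PySem.List.sorted x (fun v => v) false)).getD j [] ==
                        (A.map (fun x => PySem.List.sorted x (fun v => v) false)).getD i []) with
      | some j => if acc.contains ((i : Int)) then acc ++ [(j : Int)]
                  else acc ++ [(i : Int), (j : Int)]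
      | none => acc)
      = (fun acc i =>
      match pvSucc A A.length i with
      | some j => if acc.contains ((i : Int)) then acc ++ [(j : Int)]
                  else acc ++ [(i : Int), (j : Int)]
      | none => acc) := by
    funext acc i
    unfold pvSucc
    simp only [pv_getD_map_sorted]
  rw [hfun, pv_foldA A (A.length - 1) le_rfl]
  rcases hn : A.length with _ | k
  · rfl
  · have hlast : pvC A k = [] := by
      apply pv_C_of_succ_none
      unfold pvSucc
      have : A.length - (k+1) = 0 := by omega
      rw [this]
      rfl
    have : (k + 1) - 1 = k := by omega
    rw [this, List.range_succ, List.flatMap_append]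
    simp [hlast]

def pvStepB (A : List (List Int))
    (st : PySem.Dict (List Int) (Nat × Bool) × List (Option (List Int))) (j : Nat) :
    PySem.Dict (List Int) (Nat × Bool) × List (Option (List Int)) :=
  let key := pvKey A j
  match st.1.get? key with
  | some pf =>
      (st.1.insert key (j, false),
       st.2.set pf.1 (some (if pf.2 then [(pf.1 : Int), (j : Int)] else [(j : Int)])))
  | none => (st.1.insert key (j, true), st.2)

-- basic pvLo facts
theorem pvLo_succ (A : List (List Int)) (m : Nat) (key : List Int) :
    pvLo A (m+1) key = if pvKey A m == key then some m else pvLo A m key := by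
  unfold pvLo
  rw [List.range_succ, List.reverse_append]
  simp [List.find?_cons]
  split <;> simp_all

theorem pvLo_eq_none_iff (A : List (List Int)) (m : Nat) (key : List Int) :
    pvLo A m key = none ↔ ∀ u, u < m → pvKey A u ≠ key := by
  unfold pvLo
  rw [List.find?_eq_none]
  constructor
  · intro h u hu hk
    exact absurd (by simpa using hk) (h u (by simp [List.mem_reverse, List.mem_range, hu]))
  · intro h u hu
    rw [List.mem_reverse, List.mem_range] at hu
    simpa using h u hu

theorem pvLo_spec (A : List (List Int)) (key : List Int) :
    ∀ m p, pvLo A m key = some p →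
      p < m ∧ pvKey A p = key ∧ ∀ u, p < u → u < m → pvKey A u ≠ key := by
  intro m
  induction m with
  | zero => intro p h; simp [pvLo] at h
  | succ k ih =>
    intro p h
    rw [pvLo_succ] at h
    split at h
    · rename_i hk
      cases h
      exact ⟨Nat.lt_succ_self k, by simpa using hk, fun u h1 h2 => by omega⟩
    · rename_i hk
      obtain ⟨h1, h2, h3⟩ := ih p h
      refine ⟨by omega, h2, fun u hu1 hu2 => ?_⟩
      rcases Nat.lt_succ_iff_lt_or_eq.mp hu2 with h' | h'
      · exact h3 u hu1 h'
      · subst h'; simpa using hk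
-- pvSucc stability
theorem pvSucc_eq_none_of_le (A : List (List Int)) {m t : Nat} (h : m ≤ t + 1) :
    pvSucc A m t = none := by
  unfold pvSucc
  have : m - (t+1) = 0 := by omega
  rw [this]; rfl

theorem pvSucc_split (A : List (List Int)) {m t : Nat} (h : t < m) :
    pvSucc A (m+1) t = (pvSucc A m t).or
      (if pvKey A m == pvKey A t then some m else none) := by
  unfold pvSucc
  have hr := List.range'_append (s := t+1) (m := m - (t+1)) (n := 1) (step := 1)
  have e1 : t + 1 + 1 * (m - (t+1)) = m := by omega
  have e2 : m - (t+1) + 1 = (m+1) - (t+1) := by omega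
  rw [e1, e2] at hr
  rw [← hr, List.find?_append]
  cases hf : (List.range' (t+1) (m - (t+1))).find? (fun j => pvKey A j == pvKey A t)
  · simp [List.range'_one, List.find?_cons]
    split <;> simp_all
  · rfl

theorem pvSucc_succ_of_ne (A : List (List Int)) {m t : Nat} (hlt : t < m)
    (h : pvKey A m ≠ pvKey A t) : pvSucc A (m+1) t = pvSucc A m t := by
  rw [pvSucc_split A hlt]
  simp [h]

theorem pvSucc_succ_of_some (A : List (List Int)) {m t j : Nat} (hlt : t < m)
    (h : pvSucc A m t = some j) : pvSucc A (m+1) t = some j := by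
  rw [pvSucc_split A hlt, h]; rfl

theorem pvSucc_succ_of_none_eq (A : List (List Int)) {m t : Nat} (hlt : t < m)
    (hn : pvSucc A m t = none) (hk : pvKey A m = pvKey A t) :
    pvSucc A (m+1) t = some m := by
  rw [pvSucc_split A hlt, hn]
  simp [hk]

theorem pvSlot_congr (A : List (List Int)) {m m' t : Nat}
    (h : pvSucc A m t = pvSucc A m' t) : pvSlot A m t = pvSlot A m' t := by
  unfold pvSlot; rw [h]

theorem pvSucc_none_forall (A : List (List Int)) {m t : Nat} (hn : pvSucc A m t = none) :
    ∀ u, t < u → u < m → pvKey A u ≠ pvKey A t := by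
  intro u h1 h2 hk
  unfold pvSucc at hn
  rw [List.find?_eq_none] at hn
  exact absurd (by simpa using hk) (hn u (by rw [List.mem_range'_1]; omega))

theorem pvSucc_some_key (A : List (List Int)) {m t j : Nat} (h : pvSucc A m t = some j) :
    pvKey A j = pvKey A t := by
  have := List.find?_some h
  simpa using this

-- the main B invariant
theorem pv_foldB (A : List (List Int)) :
    ∀ m, m ≤ A.length → ∃ d : PySem.Dict (List Int) (Nat × Bool),
      (List.range m).foldl (pvStepB A) (PySem.Dict.empty, List.replicate A.length none)
        = (d, (List.range A.length).map (pvSlot A m))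
      ∧ ∀ key, d.get? key = (pvLo A m key).map (fun p => (p, pvFirst A p)) := by
  intro m
  induction m with
  | zero =>
    intro _
    refine ⟨PySem.Dict.empty, ?_, ?_⟩
    · simp only [List.range_zero, List.foldl_nil]
      congr 1
      apply List.ext_getElem
      · simp
      · intro i h1 h2
        simp only [List.getElem_replicate, List.getElem_map, List.getElem_range]
        rw [pvSlot, pvSucc_eq_none_of_le A (by omega)]
        rfl
    · intro key
      simp [PySem.Dict.get?_empty, pvLo]
  | succ m ih =>
    intro hm
    obtain ⟨d, hfold, hget⟩ := ih (by omega)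
    have hmn : m < A.length := by omega
    rw [List.range_succ, List.foldl_append, hfold, List.foldl_cons, List.foldl_nil]
    rcases hlo : pvLo A m (pvKey A m) with _ | p
    · -- first occurrence of this key
      have hfresh : ∀ u, u < m → pvKey A u ≠ pvKey A m := (pvLo_eq_none_iff A m _).mp hlo
      have hfm : pvFirst A m = true := by
        unfold pvFirst
        rw [List.all_eq_true]
        intro t ht
        rw [List.mem_range] at ht
        simpa using hfresh t ht
      have hd : d.get? (pvKey A m) = none := by rw [hget, hlo]; rfl
      refine ⟨d.insert (pvKey A m) (m, true), ?_, ?_⟩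
      · show pvStepB A (d, _) m = _
        unfold pvStepB
        simp only [hd]
        congr 1
        apply List.map_congr_left
        intro t ht
        rw [List.mem_range] at ht
        rcases lt_or_ge t m with h | h
        · rcases hs : pvSucc A m t with _ | j
          · exact pvSlot_congr A (by
              rw [pvSucc_succ_of_ne A h (fun hk => hfresh t h hk.symm)])
          · exact pvSlot_congr A (by rw [pvSucc_succ_of_some A h hs, hs])
        · exact pvSlot_congr A (by
            rw [pvSucc_eq_none_of_le A (show m ≤ t + 1 by omega),
              pvSucc_eq_none_of_le A (show m + 1 ≤ t + 1 by omega)])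
      · intro key
        rw [PySem.Dict.get?_insert, pvLo_succ]
        split
        · rename_i h; subst h; simp [hfm]
        · rename_i h
          have : (pvKey A m == key) = false := by simpa using (Ne.symm h)
          rw [this, hget]
          simp
    · -- key seen before; p is its most recent occurrence
      obtain ⟨hpm, hpk, hpmax⟩ := pvLo_spec A (pvKey A m) m p hlo
      have hd : d.get? (pvKey A m) = some (p, pvFirst A p) := by rw [hget, hlo]; rfl
      have hfm : pvFirst A m = false := by
        unfold pvFirst
        rw [List.all_eq_false]
        exact ⟨p, List.mem_range.mpr hpm, by simp [hpk]⟩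
      have hsuccp : pvSucc A m p = none := by
        rcases hs : pvSucc A m p with _ | j
        · rfl
        · have hk := pvSucc_some_key A hs
          have hj : p < j ∧ j < m := by
            have := List.mem_of_find?_eq_some hs
            rw [List.mem_range'_1] at this
            omega
          exact absurd (hk.trans hpk) (hpmax j hj.1 hj.2)
      refine ⟨d.insert (pvKey A m) (m, false), ?_, ?_⟩
      · show pvStepB A (d, _) m = _
        unfold pvStepB
        simp only [hd]
        congr 1
        apply List.ext_getElem
        · simp
        · intro t h1 h2
          rw [List.getElem_set]
          simp only [List.getElem_map, List.getElem_range]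
          have htn : t < A.length := by simpa using h2
          split
          · rename_i hpt
            subst hpt
            unfold pvSlot
            rw [pvSucc_succ_of_none_eq A hpm hsuccp (hpk.symm)]
            simp
          · rename_i hpt
            rcases lt_or_ge t m with h | h
            · rcases hs : pvSucc A m t with _ | j
              · have hne : pvKey A m ≠ pvKey A t := by
                  intro hk
                  -- t would be the most recent occurrence of the key, so t = p
                  rcases lt_trichotomy t p with h' | h' | h'
                  · exact pvSucc_none_forall A hs p h' hpm (hpk.trans hk)
                  · exact hpt h'.symm
                  · exact hpmax t h' h hk.symm
                exact pvSlot_congr A (by rw [pvSucc_succ_of_ne A h hne])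
              · exact pvSlot_congr A (by rw [pvSucc_succ_of_some A h hs, hs])
            · exact pvSlot_congr A (by
                rw [pvSucc_eq_none_of_le A (show m ≤ t + 1 by omega),
                  pvSucc_eq_none_of_le A (show m + 1 ≤ t + 1 by omega)])
      · intro key
        rw [PySem.Dict.get?_insert, pvLo_succ]
        split
        · rename_i h; subst h; simp [hfm]
        · rename_i h
          have : (pvKey A m == key) = false := by simpa using (Ne.symm h)
          rw [this, hget]
          simp

theorem pv_out_foldl :
    ∀ (l : List (Option (List Int))) (acc : List Int),
      l.foldl (fun out slot => match slot with | some x => out ++ x | none => out) acc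
      = acc ++ l.flatMap (fun s => s.getD []) := by
  intro l
  induction l with
  | nil => intro acc; simp
  | cons h tl ih =>
    intro acc
    cases h <;> simp [ih]

theorem pv_B_eq_flatMap (A : List (List Int)) :
    is_permutation_alt A = (List.range A.length).flatMap (pvC A) := by
  obtain ⟨d, hfold, -⟩ := pv_foldB A A.length le_rfl
  show ((List.range A.length).foldl (pvStepB A)
      (PySem.Dict.empty, List.replicate A.length none)).2.foldl
      (fun out slot => match slot with | some l => out ++ l | none => out) []
    = (List.range A.length).flatMap (pvC A)
  rw [hfold]
  simp only [pv_out_foldl, List.nil_append, List.flatMap_map]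
  rfl

-- ===== VERDICT (by name: the statement is the Claim_ definition above) =====
theorem is_permutation_spec : Claim_equal_is_permutation := by
  intro my_arr _
  unfold Spec_is_permutation
  rw [pv_A_eq_flatMap, pv_B_eq_flatMap]
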